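-- pv_equiv track=rewrite | github.com/Muhammad-Shaheersudocmbck/Codeforces-Solutions | Codeforces/1850/E_Cardboard_for_Pictures_371325536.py | check
-- ===== SOURCE A (Python) =====
-- def check(mid, arr, a, b):
--     ans = 0
--     for i in arr:
--         val = i + (mid + mid)
--         ans += val * val
--         if ans > b:
--             return False
--     return True
-- ===== SOURCE B (Python) =====
-- def check(mid, arr, a, b):
--     n = len(arr)
--     s1 = sum(arr)
--     s2 = sum(i * i for i in arr)
--     return s2 + 4 * mid * s1 + 4 * mid * mid * n <= b
-- ===== Notes on version B (the rewrite author's own statement) =====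
-- stated objective: simpler
-- what changed: B replaces the early-exit loop accumulating (i+2*mid)**2 term by term with three aggregates (length, sum, sum of squares) combined in one closed-form comparison s2 + 4*mid*s1 + 4*mid*mid*n <= b.
-- intended difference: On the empty list with b < 0, A returns True (its budget check only runs after adding a term) while B returns False because the total cardboard 0 exceeds the negative budget b, which is the intended reading of 'does the total fit within b'. — e.g. on check(0, [], 0, -1): A returns true, B returns false
import Mathlib
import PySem

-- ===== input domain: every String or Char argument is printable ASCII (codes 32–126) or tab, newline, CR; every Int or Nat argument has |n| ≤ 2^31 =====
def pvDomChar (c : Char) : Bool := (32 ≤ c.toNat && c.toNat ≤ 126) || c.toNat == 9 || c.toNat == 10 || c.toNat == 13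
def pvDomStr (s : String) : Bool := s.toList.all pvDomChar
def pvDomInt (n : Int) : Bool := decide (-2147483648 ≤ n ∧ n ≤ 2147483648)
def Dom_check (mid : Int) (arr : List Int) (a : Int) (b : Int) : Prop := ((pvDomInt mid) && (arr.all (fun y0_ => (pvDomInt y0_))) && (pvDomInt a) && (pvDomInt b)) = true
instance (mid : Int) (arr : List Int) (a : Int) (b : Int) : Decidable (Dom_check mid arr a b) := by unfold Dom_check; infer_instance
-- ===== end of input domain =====

-- B replaces A's early-exit term-by-term accumulation with a closed-form comparison of
-- three aggregates (length, sum, sum of squares); same cost, simpler; B differs only on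
-- the empty list with negative budget, where A's True is an artefact of checking after adding.


-- ===== PORT A =====
-- the for-loop with early return, as structural recursion over arr carrying ans
def checkLoop (mid : Int) (b : Int) (ans : Int) : List Int → Bool
  | [] => true
  | i :: rest =>
    let val := i + (mid + mid)
    let ans' := ans + val * val
    if ans' > b then false else checkLoop mid b ans' rest

def check (mid : Int) (arr : List Int) (a : Int) (b : Int) : Bool :=
  checkLoop mid b 0 arr

-- ===== PORT B =====
def check_alt (mid : Int) (arr : List Int) (a : Int) (b : Int) : Bool :=
  let n : Int := arr.length
  let s1 : Int := arr.sum
  let s2 : Int := (arr.map (fun i => i * i)).sum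
  decide (s2 + 4 * mid * s1 + 4 * mid * mid * n ≤ b)

-- ===== PRECONDITION & SPEC =====
-- On the empty list with b < 0, A returns True (its budget check only runs after adding a
-- term) while B returns False because the total cardboard 0 exceeds the negative budget b,
-- which is the intended reading of 'does the total fit within b'.
def D_check (mid : Int) (arr : List Int) (a : Int) (b : Int) : Prop := arr = [] ∧ b < 0
instance (mid : Int) (arr : List Int) (a : Int) (b : Int) : Decidable (D_check mid arr a b) := by unfold D_check; infer_instance

def Spec_check (mid : Int) (arr : List Int) (a : Int) (b : Int) (out : Bool) : Prop :=
  ¬ D_check mid arr a b → out = check_alt mid arr a b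
instance (mid : Int) (arr : List Int) (a : Int) (b : Int) (out : Bool) : Decidable (Spec_check mid arr a b out) := by unfold Spec_check; infer_instance

def pvDiffWitness_check : Int × List Int × Int × Int := (0, [], 0, -1)
def pvDiffWitnessOut_check : Bool × Bool := (true, false)

-- ===== CLAIM (what is proved, stated in full; the proofs are below) =====
def Claim_unchanged_check : Prop := ∀ (mid : Int) (arr : List Int) (a : Int) (b : Int), Dom_check mid arr a b → Spec_check mid arr a b (check mid arr a b)
def Claim_changed_check : Prop := Dom_check (pvDiffWitness_check.1) (pvDiffWitness_check.2.1) (pvDiffWitness_check.2.2.1) (pvDiffWitness_check.2.2.2) ∧ D_check (pvDiffWitness_check.1) (pvDiffWitness_check.2.1) (pvDiffWitness_check.2.2.1) (pvDiffWitness_check.2.2.2) ∧ check (pvDiffWitness_check.1) (pvDiffWitness_check.2.1) (pvDiffWitness_check.2.2.1) (pvDiffWitness_check.2.2.2) = pvDiffWitnessOut_check.1 ∧ check_alt (pvDiffWitness_check.1) (pvDiffWitness_check.2.1) (pvDiffWitness_check.2.2.1) (pvDiffWitness_check.2.2.2) = pvDiffWitnessOut_check.2 ∧ pvDiffWitnessOut_check.1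 ≠ pvDiffWitnessOut_check.2
def Claim_exact_check : Prop := ∀ (mid : Int) (arr : List Int) (a : Int) (b : Int), Dom_check mid arr a b → D_check mid arr a b → check mid arr a b ≠ check_alt mid arr a b

-- ===== LEMMAS AND PROOFS =====

-- the shifted-square sum of A expands to B's three aggregates
theorem sumShiftSq (mid : Int) (l : List Int) :
    (l.map (fun i => (i + (mid + mid)) * (i + (mid + mid)))).sum
      = (l.map (fun i => i * i)).sum + 4 * mid * l.sum + 4 * mid * mid * (l.length : Int) := by
  induction l with
  | nil => simp
  | cons x xs ih =>
    simp [List.sum_cons, ih]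
    push_cast
    ring

theorem sumSq_nonneg (f : Int → Int) (hf : ∀ i, 0 ≤ f i) (l : List Int) :
    0 ≤ (l.map f).sum := by
  induction l with
  | nil => simp
  | cons x xs ih =>
    simp only [List.map_cons, List.sum_cons]
    have := hf x
    omega

-- loop invariant: with acc ≤ b (or a nonempty remainder) the early exit is equivalent
-- to comparing the full remaining sum against b
theorem checkLoop_eq (mid b : Int) (l : List Int) :
    ∀ acc : Int, acc ≤ b ∨ l ≠ [] →
      checkLoop mid b acc l
        = decide (acc + (l.map (fun i => (i + (mid + mid)) * (i + (mid + mid)))).sum ≤ b) := by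
  induction l with
  | nil =>
    intro acc h
    have hacc : acc ≤ b := by cases h with | inl h => exact h | inr h => exact absurd rfl h
    simp [checkLoop, hacc]
  | cons x xs ih =>
    intro acc _
    simp only [checkLoop, List.map_cons, List.sum_cons]
    by_cases hgt : acc + (x + (mid + mid)) * (x + (mid + mid)) > b
    · have hs : 0 ≤ (xs.map (fun i => (i + (mid + mid)) * (i + (mid + mid)))).sum :=
        sumSq_nonneg _ (fun i => mul_self_nonneg _) xs
      have : ¬ (acc + ((x + (mid + mid)) * (x + (mid + mid)) + (xs.map (fun i => (i + (mid + mid)) * (i + (mid + mid)))).sum) ≤ b) := by omega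
      simp [hgt, this]
    · have hle : acc + (x + (mid + mid)) * (x + (mid + mid)) ≤ b := by omega
      rw [if_neg hgt, ih _ (Or.inl hle)]
      congr 1
      simp only [eq_iff_iff]
      constructor <;> intro h <;> omega

-- ===== VERDICT (by name: the statement is the Claim_ definition above) =====
theorem check_spec : Claim_unchanged_check := by
  intro mid arr a b _ hD
  unfold D_check at hD
  push_neg at hD
  unfold check check_alt
  cases arr with
  | nil =>
    have hb : 0 ≤ b := by have := hD rfl; omega
    simp [checkLoop, hb]
  | cons x xs =>
    rw [checkLoop_eq mid b (x :: xs) 0 (Or.inr (by simp)), sumShiftSq]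
    simp

theorem check_changed : Claim_changed_check := by unfold Claim_changed_check; decide

theorem check_tight : Claim_exact_check := by
  intro mid arr a b _ hD
  obtain ⟨hnil, hb⟩ := hD
  subst hnil
  have h1 : check mid [] a b = true := by simp [check, checkLoop]
  have h2 : check_alt mid [] a b = false := by simp [check_alt]; omega
  simp [h1, h2]
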